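-- pv_equiv track=rewrite | github.com/KleaSCM/Kasmeer | src/core/risk_assessment.py | _analyze_severity_distribution
-- ===== SOURCE A (Python) =====
-- from typing import Dict, List, Optional, Tuple, Any
--
-- def _analyze_severity_distribution(incidents: List[Dict]) -> Dict[str, int]:
--     # Analyze severity distribution of incidents
--     # Args:
--     #   incidents: List of incident dictionaries
--     # Returns: Severity distribution dictionary
--     severity_counts = {'low': 0, 'medium': 0, 'high': 0, 'critical': 0}
--
--     for incident in incidents:
--         severity = incident.get('severity', 0)
--         if severity <= 3:
--             severity_counts['low'] += 1
--         elif severity <= 5: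
--             severity_counts['medium'] += 1
--         elif severity <= 7:
--             severity_counts['high'] += 1
--         else:
--             severity_counts['critical'] += 1
--
--     return severity_counts
-- ===== SOURCE B (Python) =====
-- def _analyze_severity_distribution(incidents):
--     # Cumulative-count differencing: count severities under each threshold in
--     # separate passes, then take differences to get per-bucket counts.
--     sevs = [incident.get('severity', 0) for incident in incidents]
--     le3 = sum(1 for s in sevs if s <= 3)
--     le5 = sum(1 for s in sevs if s <= 5)
--     le7 = sum(1 for s in sevs if s <= 7)
--     return {'low': le3, 'medium': le5 - le3,
--             'high': le7 - le5, 'critical': len(sevs) - le7}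
-- ===== Notes on version B (the rewrite author's own statement) =====
-- stated objective: alternative
-- what changed: Replaces the single-pass if/elif bucket dispatch mutating a pre-seeded dict with staged passes: cumulative counts of severities <=3, <=5, <=7 computed independently, bucket sizes obtained by differencing the cumulative counts.
import Mathlib
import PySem

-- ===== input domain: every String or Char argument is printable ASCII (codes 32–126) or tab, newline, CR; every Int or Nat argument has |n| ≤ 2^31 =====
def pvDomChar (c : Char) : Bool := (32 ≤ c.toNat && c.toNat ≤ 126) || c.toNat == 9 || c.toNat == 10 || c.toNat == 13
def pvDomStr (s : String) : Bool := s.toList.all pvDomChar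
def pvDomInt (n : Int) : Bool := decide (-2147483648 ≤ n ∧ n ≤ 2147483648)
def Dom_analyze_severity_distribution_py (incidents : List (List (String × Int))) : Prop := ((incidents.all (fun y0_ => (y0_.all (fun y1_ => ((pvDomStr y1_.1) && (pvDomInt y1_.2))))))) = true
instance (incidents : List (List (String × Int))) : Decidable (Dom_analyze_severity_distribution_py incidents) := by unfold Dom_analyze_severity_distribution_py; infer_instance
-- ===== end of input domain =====

-- B replaces A's single-pass if/elif dispatch with cumulative threshold counts (<=3, <=5, <=7) differenced into bucket sizes (alternative decomposition, same cost).

-- ===== PORT A =====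
-- A's loop body (the if/elif cascade over the running dict), named so the fold is readable.
def pvStepA (counts : PySem.Dict String Int) (incident : List (String × Int)) : PySem.Dict String Int :=
  let severity := (PySem.Dict.mk incident).getD "severity" 0
  if severity ≤ 3 then counts.insert "low" (counts.getD "low" 0 + 1)
  else if severity ≤ 5 then counts.insert "medium" (counts.getD "medium" 0 + 1)
  else if severity ≤ 7 then counts.insert "high" (counts.getD "high" 0 + 1)
  else counts.insert "critical" (counts.getD "critical" 0 + 1)

def analyze_severity_distribution_py (incidents : List (List (String × Int))) : List (String × Int) :=
  let init : PySem.Dict String Int :=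
    PySem.Dict.mk [("low", 0), ("medium", 0), ("high", 0), ("critical", 0)]
  (incidents.foldl pvStepA init).items

-- ===== PORT B =====
def analyze_severity_distribution_py_alt (incidents : List (List (String × Int))) : List (String × Int) :=
  let sevs := incidents.map (fun incident => (PySem.Dict.mk incident).getD "severity" 0)
  let le3 : Int := ((sevs.filter (fun s => s ≤ 3)).length : Int)
  let le5 : Int := ((sevs.filter (fun s => s ≤ 5)).length : Int)
  let le7 : Int := ((sevs.filter (fun s => s ≤ 7)).length : Int)
  [("low", le3), ("medium", le5 - le3), ("high", le7 - le5),
   ("critical", (sevs.length : Int) - le7)]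

-- ===== PRECONDITION & SPEC =====
def Spec_analyze_severity_distribution_py (incidents : List (List (String × Int))) (out : List (String × Int)) : Prop := out = analyze_severity_distribution_py_alt incidents
instance (incidents : List (List (String × Int))) (out : List (String × Int)) : Decidable (Spec_analyze_severity_distribution_py incidents out) := by unfold Spec_analyze_severity_distribution_py; infer_instance

-- ===== CLAIM (what is proved, stated in full; the proofs are below) =====
def Claim_equal_analyze_severity_distribution_py : Prop := ∀ (incidents : List (List (String × Int))), Dom_analyze_severity_distribution_py incidents → Spec_analyze_severity_distribution_py incidents (analyze_severity_distribution_py incidents)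

-- ===== LEMMAS AND PROOFS =====

-- Invariant: A's fold starting from the dict (a,b,c,d) ends with the four counts offset
-- by a,b,c,d and each bucket expressed as a difference of cumulative threshold counts
-- over the remaining severities; induction over the incident list.
lemma pv_loop_eq (incs : List (List (String × Int))) (a b c d : Int) :
    (incs.foldl pvStepA
      (PySem.Dict.mk [("low", a), ("medium", b), ("high", c), ("critical", d)])).items
    = (let sevs := incs.map (fun incident => (PySem.Dict.mk incident).getD "severity" 0)
       let le3 : Int := ((sevs.filter (fun s => s ≤ 3)).length : Int)
       let le5 : Int := ((sevs.filter (fun s => s ≤ 5)).length : Int)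
       let le7 : Int := ((sevs.filter (fun s => s ≤ 7)).length : Int)
       [("low", a + le3), ("medium", b + (le5 - le3)), ("high", c + (le7 - le5)),
        ("critical", d + ((sevs.length : Int) - le7))]) := by
  induction incs generalizing a b c d with
  | nil => simp
  | cons inc rest ih =>
    simp only [List.foldl_cons, List.map_cons, List.filter_cons, List.length_cons]
    set s := (PySem.Dict.mk inc).getD "severity" 0 with hs
    by_cases h1 : s ≤ 3
    · have hstep : pvStepA (PySem.Dict.mk [("low", a), ("medium", b), ("high", c), ("critical", d)]) inc
          = PySem.Dict.mk [("low", a + 1), ("medium", b), ("high", c), ("critical", d)] := by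
        unfold pvStepA
        rw [← hs, if_pos h1]
        simp [PySem.Dict.insert, PySem.Dict.getD, PySem.Dict.get?, PySem.Dict.contains]
      rw [hstep, ih (a + 1) b c d]
      simp only [h1, show s ≤ 5 by omega, show s ≤ 7 by omega, decide_true, if_true,
        List.length_cons, List.cons.injEq, Prod.mk.injEq]
      and_intros <;> first | trivial | (push_cast; ring)
    · by_cases h2 : s ≤ 5
      · have hstep : pvStepA (PySem.Dict.mk [("low", a), ("medium", b), ("high", c), ("critical", d)]) inc
            = PySem.Dict.mk [("low", a), ("medium", b + 1), ("high", c), ("critical", d)] := by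
          unfold pvStepA
          rw [← hs, if_neg h1, if_pos h2]
          simp [PySem.Dict.insert, PySem.Dict.getD, PySem.Dict.get?, PySem.Dict.contains]
        rw [hstep, ih a (b + 1) c d]
        simp only [h1, h2, show s ≤ 7 by omega, decide_true, decide_false, if_true, if_false,
          List.length_cons, List.cons.injEq, Prod.mk.injEq]
        and_intros <;> first | trivial | (push_cast; ring)
      · by_cases h3 : s ≤ 7
        · have hstep : pvStepA (PySem.Dict.mk [("low", a), ("medium", b), ("high", c), ("critical", d)]) inc
              = PySem.Dict.mk [("low", a), ("medium", b), ("high", c + 1), ("critical", d)] := by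
            unfold pvStepA
            rw [← hs, if_neg h1, if_neg h2, if_pos h3]
            simp [PySem.Dict.insert, PySem.Dict.getD, PySem.Dict.get?, PySem.Dict.contains]
          rw [hstep, ih a b (c + 1) d]
          simp only [h1, h2, h3, decide_true, decide_false, if_true, if_false,
            List.length_cons, List.cons.injEq, Prod.mk.injEq]
          and_intros <;> first | trivial | (push_cast; ring)
        · have hstep : pvStepA (PySem.Dict.mk [("low", a), ("medium", b), ("high", c), ("critical", d)]) inc
              = PySem.Dict.mk [("low", a), ("medium", b), ("high", c), ("critical", d + 1)] := by
            unfold pvStepA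
            rw [← hs, if_neg h1, if_neg h2, if_neg h3]
            simp [PySem.Dict.insert, PySem.Dict.getD, PySem.Dict.get?, PySem.Dict.contains]
          rw [hstep, ih a b c (d + 1)]
          simp only [h1, h2, h3, decide_false, if_false,
            List.length_cons, List.cons.injEq, Prod.mk.injEq]
          and_intros <;> first | trivial | (push_cast; ring)

-- ===== VERDICT (by name: the statement is the Claim_ definition above) =====
theorem analyze_severity_distribution_py_spec : Claim_equal_analyze_severity_distribution_py := by
  intro incidents _
  unfold Spec_analyze_severity_distribution_py analyze_severity_distribution_py analyze_severity_distribution_py_alt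
  rw [pv_loop_eq incidents 0 0 0 0]
  simp
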